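-- pv_equiv track=rewrite | github.com/daniel-reich/ubiquitous-fiesta | HaMCeHeJkaWvMg7LS_11.py | sun_loungers
-- ===== SOURCE A (Python) =====
-- def sun_loungers(beach):
--   beach = list(beach)
--   if len(beach) < 2:
--     return 1 if beach == ['0'] else 0
--   if beach[0] == beach[1] == '0':
--     beach[0] = 2
--   for i in range(1,len(beach)-1):
--     if beach[i] == '0' and beach[i-1] == '0' and beach[i+1] == '0':
--       beach[i] = 2
--   if beach[-2] == beach[-1] == '0':
--     beach[-1] = 2
--   return beach.count(2)
-- ===== SOURCE B (Python) =====
-- def sun_loungers(beach):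
--     # Run-length scan: a virtual empty spot is padded at each end; a maximal
--     # padded run of L consecutive '0' spots admits (L - 1) // 2 loungers.
--     total = 0
--     run = 1  # virtual empty spot before the beach
--     for c in beach:
--         if c == '0':
--             run += 1
--         elif run:
--             total += (run - 1) // 2  # run ended inside the beach
--             run = 0
--     return total + run // 2  # last run is closed by the virtual trailing spot
-- ===== Notes on version B (the rewrite author's own statement) =====
-- stated objective: simpler
-- what changed: Replaces the in-place '2'-marking greedy with its two boundary special cases by a single run-length scan that pads a virtual empty spot at each end and adds (L-1)//2 per maximal run of '0's.
import Mathlib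
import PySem

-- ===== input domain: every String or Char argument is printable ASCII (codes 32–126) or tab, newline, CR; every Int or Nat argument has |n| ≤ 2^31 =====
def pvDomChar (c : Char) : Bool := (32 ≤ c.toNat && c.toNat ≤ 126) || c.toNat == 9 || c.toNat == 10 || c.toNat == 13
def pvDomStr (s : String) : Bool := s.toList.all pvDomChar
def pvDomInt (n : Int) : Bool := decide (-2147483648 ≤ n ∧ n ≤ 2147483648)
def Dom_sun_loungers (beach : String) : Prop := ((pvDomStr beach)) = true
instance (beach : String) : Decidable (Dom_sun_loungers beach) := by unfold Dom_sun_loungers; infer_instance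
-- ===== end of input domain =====

-- B replaces A's in-place '2'-marking greedy (with its two boundary checks) by one
-- run-length scan over maximal runs of '0', padded with a virtual empty spot at each
-- end, adding (L-1)//2 per run: simpler, same O(n) cost, same return value everywhere.

-- ===== PORT A =====
-- Cells are `Option Char`: `some c` is the original character, `none` is Python's
-- mark `2` (an int 2 never equals any str, and `.count(2)` counts exactly the marks,
-- so `count none` is exact).
def aStep (bb : List (Option Char)) (i : Nat) : List (Option Char) :=
  if bb.getD i none == some '0' && bb.getD (i-1) none == some '0'
      && bb.getD (i+1) none == some '0' then bb.set i none else bb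

-- if beach[-2] == beach[-1] == '0': beach[-1] = 2   (indices in range since len ≥ 2)
def lastStep (bb : List (Option Char)) : List (Option Char) :=
  if bb.getD (bb.length - 2) none == some '0' && bb.getD (bb.length - 1) none == some '0'
  then bb.set (bb.length - 1) none else bb

def sun_loungers (beach : String) : Int :=
  let b : List (Option Char) := beach.toList.map some
  if b.length < 2 then (if beach.toList = ['0'] then 1 else 0)
  else
    -- if beach[0] == beach[1] == '0': beach[0] = 2
    let b1 := if b.getD 0 none == some '0' && b.getD 1 none == some '0'
              then b.set 0 none else b
    -- for i in range(1, len(beach)-1): …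
    let b2 := (List.range' 1 (b1.length - 2)).foldl aStep b1
    ((lastStep b2).count none : Int)

-- ===== PORT B =====
def bStep (p : Int × Int) (c : Char) : Int × Int :=
  if c == '0' then (p.1, p.2 + 1)
  else if p.2 != 0 then (p.1 + PySem.Int.floordiv (p.2 - 1) 2, 0)
  else p

def sun_loungers_alt (beach : String) : Int :=
  let p := beach.toList.foldl bStep ((0 : Int), (1 : Int))
  p.1 + PySem.Int.floordiv p.2 2

-- ===== PRECONDITION & SPEC =====
def Spec_sun_loungers (beach : String) (out : Int) : Prop := out = sun_loungers_alt beach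
instance (beach : String) (out : Int) : Decidable (Spec_sun_loungers beach out) := by unfold Spec_sun_loungers; infer_instance

-- ===== CLAIM (what is proved, stated in full; the proofs are below) =====
def Claim_equal_sun_loungers : Prop := ∀ (beach : String), Dom_sun_loungers beach → Spec_sun_loungers beach (sun_loungers beach)

-- ===== LEMMAS AND PROOFS =====

-- Reference scan: processes the beach left to right with one boolean of state
-- ("is the previous spot currently an unoccupied, unmarked '0'"), the final
-- singleton case playing A's last-cell step (virtual trailing empty spot).
def gspec : Bool → List Char → Int
  | _, [] => 0
  | prev, [c] => if prev && (c == '0') then 1 else 0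
  | prev, c :: c' :: rest =>
      if (c == '0') && prev && (c' == '0') then 1 + gspec false (c' :: rest)
      else gspec (c == '0') (c' :: rest)

lemma getD_append_len {α : Type} (pre : List α) (x : α) (tl : List α) (d : α) :
    (pre ++ x :: tl).getD pre.length d = x := by
  induction pre with
  | nil => rfl
  | cons a pre ih => simpa using ih

lemma getD_append_pred {α : Type} (pre : List α) (y : α) (tl : List α) (d : α)
    (h : pre.getLast? = some y) : (pre ++ tl).getD (pre.length - 1) d = y := by
  induction pre generalizing tl with
  | nil => simp at h
  | cons a pre ih =>
    cases pre with
    | nil => simp_all [List.getD]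
    | cons b pre' =>
      have := ih (tl := tl) (by simpa using h)
      simpa [List.getD] using this

lemma set_append_len {α : Type} (pre : List α) (x : α) (tl : List α) (v : α) :
    (pre ++ x :: tl).set pre.length v = pre ++ v :: tl := by
  induction pre with
  | nil => rfl
  | cons a pre ih => simpa using ih

-- gspec ignores its flag when the head is not '0'
lemma gspec_flag_irrel (rest : List Char) (c : Char) (hc : (c == '0') = false)
    (b b' : Bool) : gspec b (c :: rest) = gspec b' (c :: rest) := by
  cases rest with
  | nil => simp [gspec, hc]
  | cons c' r => simp [gspec, hc]

lemma loop_char : ∀ (suf : List Char) (c : Char) (pre : List (Option Char)), pre ≠ [] →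
    ((lastStep ((List.range' pre.length ((c :: suf).length - 1)).foldl aStep
        (pre ++ (c :: suf).map some))).count none : Int)
      = (pre.count none : Int) + gspec (pre.getLast? == some (some '0')) (c :: suf) := by
  intro suf
  induction suf with
  | nil =>
    intro c pre hpre
    obtain ⟨y, hy⟩ := List.getLast?_isSome.2 hpre |> Option.isSome_iff_exists.1
    have hpl : pre.length ≠ 0 := by simpa [List.length_eq_zero_iff] using hpre
    simp only [List.length_cons, List.length_nil, Nat.add_sub_cancel, List.range'_zero,
      List.foldl_nil, List.map_cons, List.map_nil]
    have hlen : (pre ++ [some c]).length = pre.length + 1 := by simp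
    have hg1 : (pre ++ [some c]).getD ((pre ++ [some c]).length - 1) none = some c := by
      rw [hlen]; simpa using getD_append_len pre (some c) [] none
    have hg2 : (pre ++ [some c]).getD ((pre ++ [some c]).length - 2) none = y := by
      rw [hlen, show pre.length + 1 - 2 = pre.length - 1 by omega]
      exact getD_append_pred pre y [some c] none hy
    unfold lastStep
    rw [hg1, hg2]
    by_cases hcy : y = some '0' <;> by_cases hcc : c = '0'
    · rw [if_pos (by simp [hcy, hcc])]
      rw [hlen, Nat.add_sub_cancel, set_append_len pre (some c) [] none]
      simp [List.count_append, gspec, hy, hcy, hcc]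
    · rw [if_neg (by simp [hcc])]
      simp [List.count_append, gspec, hy, hcc]
    · rw [if_neg (by simp [hcy])]
      simp [List.count_append, gspec, hy, hcy]
    · rw [if_neg (by simp [hcc])]
      simp [List.count_append, gspec, hy, hcc]
  | cons c' rest ih =>
    intro c pre hpre
    obtain ⟨y, hy⟩ := List.getLast?_isSome.2 hpre |> Option.isSome_iff_exists.1
    have hrange : List.range' pre.length ((c :: c' :: rest).length - 1)
        = pre.length :: List.range' (pre.length + 1) ((c' :: rest).length - 1) := by
      simp [List.range'_succ]
    have hb : pre ++ (c :: c' :: rest).map some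
        = pre ++ some c :: (c' :: rest).map some := by simp
    rw [hrange, hb, List.foldl_cons]
    have hgi : (pre ++ some c :: (c' :: rest).map some).getD pre.length none = some c :=
      getD_append_len _ _ _ _
    have hgp : (pre ++ some c :: (c' :: rest).map some).getD (pre.length - 1) none = y :=
      getD_append_pred _ _ _ _ hy
    have hgn : (pre ++ some c :: (c' :: rest).map some).getD (pre.length + 1) none
        = some c' := by
      rw [show pre ++ some c :: (c' :: rest).map some
          = (pre ++ [some c]) ++ some c' :: rest.map some by simp]
      have h := getD_append_len (pre ++ [some c]) (some c') (rest.map some) none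
      simpa using h
    by_cases h0 : c = '0' ∧ y = some '0' ∧ c' = '0'
    · obtain ⟨hc0, hy0, hc'0⟩ := h0
      have hstep : aStep (pre ++ some c :: (c' :: rest).map some) pre.length
          = (pre ++ [none]) ++ (c' :: rest).map some := by
        unfold aStep
        rw [hgi, hgp, hgn, if_pos (by simp [hc0, hy0, hc'0])]
        rw [set_append_len]; simp
      rw [hstep]
      have := ih c' (pre ++ [none]) (by simp)
      rw [show (pre ++ ([none] : List (Option Char))).length = pre.length + 1 by simp] at this
      rw [this]
      have : gspec (pre.getLast? == some (some '0')) (c :: c' :: rest)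
          = 1 + gspec false (c' :: rest) := by
        simp [gspec, hy, hc0, hy0, hc'0]
      rw [this]
      simp [List.count_append]
      ring
    · have hstep : aStep (pre ++ some c :: (c' :: rest).map some) pre.length
          = (pre ++ [some c]) ++ (c' :: rest).map some := by
        unfold aStep
        rw [hgi, hgp, hgn, if_neg (by
          intro hx
          simp only [Bool.and_eq_true, beq_iff_eq, Option.some.injEq] at hx
          exact h0 ⟨hx.1.1, hx.1.2, hx.2⟩)]
        simp
      rw [hstep]
      have := ih c' (pre ++ [some c]) (by simp)
      rw [show (pre ++ ([some c] : List (Option Char))).length = pre.length + 1 by simp] at this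
      rw [this]
      have hglast : (pre ++ [some c]).getLast? = some (some c) := by simp
      rw [hglast]
      have hgs : gspec (pre.getLast? == some (some '0')) (c :: c' :: rest)
          = gspec (c == '0') (c' :: rest) := by
        rw [hy]
        by_cases hc0 : c = '0' <;> by_cases hy0 : y = some '0' <;> by_cases hc'0 : c' = '0'
        · exact absurd ⟨hc0, hy0, hc'0⟩ h0
        all_goals simp [gspec, hc0, hy0, hc'0]
      rw [hgs]
      have hbc : ((some (some c) : Option (Option Char)) == some (some '0')) = (c == '0') := by
        cases h : c == '0' <;> simp_all
      rw [hbc]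
      simp [List.count_append]

-- A computes the reference scan started with a virtual free spot on the left.
lemma a_eq_gspec (beach : String) :
    sun_loungers beach = gspec true beach.toList := by
  unfold sun_loungers
  cases hl : beach.toList with
  | nil => simp [gspec]
  | cons c0 tl =>
    cases tl with
    | nil =>
      by_cases hc : c0 = '0' <;> simp [hc, gspec, List.getD]
    | cons c1 rest =>
      simp only [List.map_cons, List.length_cons]
      rw [if_neg (by omega)]
      have hg0 : ((some c0 :: some c1 :: rest.map some) : List (Option Char)).getD 0 none
          = some c0 := rfl
      have hg1 : ((some c0 :: some c1 :: rest.map some) : List (Option Char)).getD 1 none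
          = some c1 := rfl
      rw [hg0, hg1]
      by_cases h0 : c0 = '0' ∧ c1 = '0'
      · obtain ⟨hc0, hc1⟩ := h0
        rw [show ((some c0 : Option Char) == some '0' && (some c1 : Option Char) == some '0')
            = true from by simp [hc0, hc1]]
        rw [if_pos rfl]
        rw [show ((some c0 :: some c1 :: rest.map some) : List (Option Char)).set 0 none
            = ([none] : List (Option Char)) ++ (c1 :: rest).map some from by simp]
        rw [show ((([none] : List (Option Char)) ++ (c1 :: rest).map some)).length - 2
            = (c1 :: rest).length - 1 by simp]
        have hlc := loop_char rest c1 [none] (by simp)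
        rw [show ([none] : List (Option Char)).length = 1 from rfl] at hlc
        rw [show (([none] : List (Option Char)).getLast? == some (some '0')) = false
            from rfl] at hlc
        rw [hlc]
        have hg : gspec true (c0 :: c1 :: rest) = 1 + gspec false (c1 :: rest) := by
          simp [gspec, hc0, hc1]
        rw [hg]
        simp
      · rw [show ((some c0 : Option Char) == some '0' && (some c1 : Option Char) == some '0')
            = false from by
              rcases Bool.eq_false_or_eq_true
                ((some c0 : Option Char) == some '0' && (some c1 : Option Char) == some '0')
                with h | h
              · simp only [Bool.and_eq_true, beq_iff_eq, Option.some.injEq] at h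
                exact absurd ⟨h.1, h.2⟩ h0
              · exact h]
        rw [if_neg (by simp)]
        rw [show ((some c0 :: some c1 :: rest.map some) : List (Option Char))
            = ([some c0] : List (Option Char)) ++ (c1 :: rest).map some from by simp]
        rw [show ((([some c0] : List (Option Char)) ++ (c1 :: rest).map some)).length - 2
            = (c1 :: rest).length - 1 by simp]
        have hlc := loop_char rest c1 [some c0] (by simp)
        rw [show ([some c0] : List (Option Char)).length = 1 from rfl] at hlc
        rw [show (([some c0] : List (Option Char)).getLast? == some (some '0'))
            = (c0 == '0') from by cases h : c0 == '0' <;> simp_all] at hlc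
        rw [hlc]
        have hgs : gspec true (c0 :: c1 :: rest) = gspec (c0 == '0') (c1 :: rest) := by
          by_cases hc0 : c0 = '0' <;> by_cases hc1 : c1 = '0'
          · exact absurd ⟨hc0, hc1⟩ h0
          all_goals simp [gspec, hc0, hc1]
        rw [hgs]
        simp

lemma gspec_step (b : Bool) (c c' : Char) (rest : List Char)
    (h : (c == '0') = false ∨ b = false ∨ (c' == '0') = false) :
    gspec b (c :: c' :: rest) = gspec (c == '0') (c' :: rest) := by
  rcases h with h | h | h <;> simp [gspec, h]

-- pending marks of the current run r, depending on whether it is still open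
def pend (l : List Char) (r : Int) : Int :=
  match l with
  | [] => PySem.Int.floordiv r 2
  | c :: _ => if c == '0' then PySem.Int.floordiv r 2 else PySem.Int.floordiv (r - 1) 2

lemma bfold_char (l : List Char) : ∀ (t r : Int),
    (1 ≤ r →
      (l.foldl bStep (t, r)).1 + PySem.Int.floordiv (l.foldl bStep (t, r)).2 2
        = t + pend l r + gspec (r % 2 == 1) l)
    ∧ ((l.foldl bStep (t, 0)).1 + PySem.Int.floordiv (l.foldl bStep (t, 0)).2 2
        = t + gspec false l) := by
  have hfd : ∀ a : Int, PySem.Int.floordiv a 2 = a / 2 := fun a =>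
    PySem.Int.floordiv_eq_ediv_of_pos (by norm_num)
  have hbe0 : (((0 : Int) == 1)) = false := by decide
  have hbe1 : (((1 : Int) == 1)) = true := by decide
  induction l with
  | nil =>
    intro t r
    refine ⟨fun hr => ?_, ?_⟩
    · simp [pend, gspec, hfd]
    · simp [gspec, hfd]
  | cons c rest ih =>
    intro t r
    constructor
    · intro hr
      by_cases hc : (c == '0') = true
      · rw [List.foldl_cons, show bStep (t, r) c = (t, r + 1) from by simp [bStep, hc]]
        rw [(ih t (r + 1)).1 (by omega)]
        cases rest with
        | nil =>
          rcases Int.emod_two_eq_zero_or_one r with h | h <;>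
            · have h' : (r + 1) % 2 = 1 - r % 2 := by omega
              simp [pend, gspec, hfd, hc, h, h', hbe0, hbe1]
              omega
        | cons c' rest' =>
          by_cases hc' : (c' == '0') = true
          · rcases Int.emod_two_eq_zero_or_one r with h | h
            · have h1 : (r + 1) % 2 = 1 := by omega
              simp [h, h1, pend, hc, hc', hfd, gspec, hbe0, hbe1]
              omega
            · have h1 : (r + 1) % 2 = 0 := by omega
              simp [h, h1, pend, hc, hc', hfd, gspec, hbe0, hbe1]
              omega
          · have hc'' : (c' == '0') = false := by simpa using hc'
            rw [gspec_step _ _ _ _ (Or.inr (Or.inr hc''))]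
            rw [gspec_flag_irrel rest' c' hc'' ((r + 1) % 2 == 1) false]
            rw [gspec_flag_irrel rest' c' hc'' (c == '0') false]
            simp only [pend, hc, hc'', if_true, if_false, Bool.false_eq_true, ite_false,
              hfd]
            generalize gspec false (c' :: rest') = G
            omega
      · have hc0 : (c == '0') = false := by simpa using hc
        rw [List.foldl_cons, show bStep (t, r) c = (t + PySem.Int.floordiv (r - 1) 2, 0)
            from by simp [bStep, hc0, show r ≠ 0 by omega]]
        rw [(ih (t + PySem.Int.floordiv (r - 1) 2) r).2]
        have hg : gspec (r % 2 == 1) (c :: rest) = gspec false rest := by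
          cases rest with
          | nil => cases h : (r % 2 == 1) <;> simp [gspec, hc0, h]
          | cons c' r' => rw [gspec_step _ _ _ _ (Or.inl hc0), hc0]
        rw [hg]
        simp only [pend, hc0, Bool.false_eq_true, ite_false]
    · by_cases hc : (c == '0') = true
      · rw [List.foldl_cons, show bStep (t, 0) c = (t, 1) from by simp [bStep, hc]]
        rw [(ih t 1).1 (by norm_num)]
        have hp : pend rest 1 = 0 := by
          cases rest with
          | nil => simp [pend, hfd]
          | cons c' r' => cases h : (c' == '0') <;> simp [pend, h, hfd]
        rw [hp]
        have h1 : (((1 : Int) % 2) == 1) = true := by decide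
        rw [h1]
        cases rest with
        | nil => simp [gspec, hc]
        | cons c' r' =>
          rw [gspec_step _ _ _ _ (Or.inr (Or.inl rfl)), hc]
          generalize gspec true (c' :: r') = G
          ring
      · have hc0 : (c == '0') = false := by simpa using hc
        rw [List.foldl_cons, show bStep (t, 0) c = (t, 0) from by simp [bStep, hc0]]
        rw [(ih t 0).2]
        have hg : gspec false (c :: rest) = gspec false rest := by
          cases rest with
          | nil => simp [gspec, hc0]
          | cons c' r' => rw [gspec_step _ _ _ _ (Or.inl hc0), hc0]
        rw [hg]

-- B also computes the reference scan started with a virtual free spot.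
lemma b_eq_gspec (beach : String) :
    sun_loungers_alt beach = gspec true beach.toList := by
  unfold sun_loungers_alt
  have h := (bfold_char beach.toList 0 1).1 (by norm_num)
  simp only [h]
  have hp : pend beach.toList 1 = 0 := by
    have hfd : ∀ a : Int, PySem.Int.floordiv a 2 = a / 2 := fun a =>
      PySem.Int.floordiv_eq_ediv_of_pos (by norm_num)
    cases beach.toList with
    | nil => simp [pend, hfd]
    | cons c l => cases h : (c == '0') <;> simp [pend, h, hfd]
  rw [hp]
  have h1 : (((1 : Int) % 2) == 1) = true := by decide
  rw [h1]
  ring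

-- ===== VERDICT (by name: the statement is the Claim_ definition above) =====
theorem sun_loungers_spec : Claim_equal_sun_loungers := by
  intro beach _
  unfold Spec_sun_loungers
  rw [a_eq_gspec, b_eq_gspec]
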